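-- pv_equiv track=rewrite | github.com/rahulsamant37/Daily-Task | codeforces/cp-templates/python/string-algorithms/ZAlgirthm.py | z_to_prefix_function
-- ===== SOURCE A (Python) =====
-- def z_to_prefix_function(z):
--     """
--     Convert Z-array to prefix function array
--
--     Returns:
--         prefix function array
--     """
--     n = len(z)
--     pi = [0] * n
--
--     for i in range(1, n):
--         for j in range(z[i] - 1, -1, -1):
--             if pi[i + j] == 0:
--                 pi[i + j] = j + 1
--             else:
--                 break
--
--     return pi
-- ===== SOURCE B (Python) =====
-- def z_to_prefix_function(z):
--     """
--     Convert Z-array to prefix function array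
--
--     Returns:
--         prefix function array
--     """
--     n = len(z)
--     pi = [0] * n
--     # Pass 1: mark only the endpoint of each Z-box with its length.
--     for i in range(1, n):
--         if z[i] > 0:
--             e = i + z[i] - 1
--             if pi[e] < z[i]:
--                 pi[e] = z[i]
--     # Pass 2: propagate each endpoint value leftward, decreasing by one.
--     for p in range(n - 1, 0, -1):
--         v = pi[p] - 1
--         if pi[p - 1] < v:
--             pi[p - 1] = v
--     return pi
-- ===== Notes on version B (the rewrite author's own statement) =====
-- stated objective: alternative
-- what changed: Replaces A's per-box greedy descent with early break by an endpoint-marking pass followed by a single backward max-propagation sweep.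
import Mathlib
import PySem

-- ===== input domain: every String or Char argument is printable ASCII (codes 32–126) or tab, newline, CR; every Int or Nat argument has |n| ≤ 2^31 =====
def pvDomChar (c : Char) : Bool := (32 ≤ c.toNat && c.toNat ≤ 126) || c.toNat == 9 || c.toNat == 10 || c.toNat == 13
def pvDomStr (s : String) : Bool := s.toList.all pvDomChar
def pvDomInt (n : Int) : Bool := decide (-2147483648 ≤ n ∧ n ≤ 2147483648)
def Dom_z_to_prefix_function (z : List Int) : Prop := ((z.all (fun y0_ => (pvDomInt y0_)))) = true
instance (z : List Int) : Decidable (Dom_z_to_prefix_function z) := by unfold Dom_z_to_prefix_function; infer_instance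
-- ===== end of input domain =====

-- B replaces A's per-box greedy descent (with early break) by an endpoint-marking
-- pass plus one backward max-propagation sweep; same values, alternative algorithm.

-- ===== PORT A =====
-- inner loop: 'for j in range(z[i]-1, -1, -1): if pi[i+j]==0: pi[i+j]=j+1 else: break'
def aInner (i : Nat) : Nat → List Int → List Int
  | j, pi =>
    if pi.getD (i + j) 0 = 0 then
      match j with
      | 0 => pi.set (i + j) ((j : Int) + 1)
      | Nat.succ j' => aInner i j' (pi.set (i + j) ((j : Int) + 1))
    else pi

-- one outer-loop iteration (body of 'for i in range(1, n)')
def aStep (z : List Int) (pi : List Int) (i : Int) : List Int :=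
  let zi := z.getD i.toNat 0
  if 0 < zi then aInner i.toNat (zi - 1).toNat pi else pi

def z_to_prefix_function (z : List Int) : List Int :=
  (PySem.List.pyRange 1 (z.length : Int) 1).foldl (aStep z) (List.replicate z.length (0 : Int))

-- ===== PORT B =====
-- pass 1 body: mark the endpoint e = i + z[i] - 1 of each box with max(pi[e], z[i])
def bStep (z : List Int) (pi : List Int) (i : Int) : List Int :=
  let zi := z.getD i.toNat 0
  if 0 < zi then
    let e := i.toNat + (zi - 1).toNat
    if pi.getD e 0 < zi then pi.set e zi else pi
  else pi

-- pass 2: 'for p in range(n-1, 0, -1): v = pi[p]-1; if pi[p-1] < v: pi[p-1] = v'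
def bSweep : Nat → List Int → List Int
  | 0, pi => pi
  | Nat.succ p', pi =>
    let v := pi.getD (p' + 1) 0 - 1
    bSweep p' (if pi.getD p' 0 < v then pi.set p' v else pi)

def z_to_prefix_function_alt (z : List Int) : List Int :=
  bSweep (z.length - 1)
    ((PySem.List.pyRange 1 (z.length : Int) 1).foldl (bStep z) (List.replicate z.length (0 : Int)))

-- ===== PRECONDITION & SPEC =====
-- Pre_ excludes exactly the inputs where A raises IndexError: a positive z[i]
-- (1 ≤ i < n) whose box i + z[i] - 1 reaches past the end of the list.
def Pre_z_to_prefix_function (z : List Int) : Prop :=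
  ∀ i, i < z.length → 1 ≤ i → 0 < z.getD i 0 → (i : Int) + z.getD i 0 ≤ (z.length : Int)

instance (z : List Int) : Decidable (Pre_z_to_prefix_function z) := by
  unfold Pre_z_to_prefix_function; infer_instance

def pvWitness_z_to_prefix_function : List Int := [0, 2, 1, 0]

def Spec_z_to_prefix_function (z : List Int) (out : List Int) : Prop := out = z_to_prefix_function_alt z
instance (z : List Int) (out : List Int) : Decidable (Spec_z_to_prefix_function z out) := by
  unfold Spec_z_to_prefix_function; infer_instance

-- ===== CLAIM (what is proved, stated in full; the proofs are below) =====
def Claim_equal_z_to_prefix_function : Prop := ∀ (z : List Int), Dom_z_to_prefix_function z → Pre_z_to_prefix_function z → Spec_z_to_prefix_function z (z_to_prefix_function z)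

-- ===== LEMMAS AND PROOFS =====

-- contribution of Z-box i to position p: p - i + 1 if the box covers p, else 0
def contrib (z : List Int) (i p : Nat) : Int :=
  if 1 ≤ i ∧ 0 < z.getD i 0 ∧ (i : Int) ≤ (p : Int) ∧ (p : Int) ≤ (i : Int) + z.getD i 0 - 1
  then (p : Int) - (i : Int) + 1 else 0

-- prefix-function value at p from the first k boxes
def Fk (z : List Int) (k p : Nat) : Int :=
  (List.range k).foldl (fun a i => max a (contrib z i p)) 0

-- endpoint mark of box i at position p: z[i] if the box ends exactly at p, else 0
def gcontrib (z : List Int) (i p : Nat) : Int :=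
  if 1 ≤ i ∧ 0 < z.getD i 0 ∧ (p : Int) = (i : Int) + z.getD i 0 - 1
  then z.getD i 0 else 0

def Gk (z : List Int) (k p : Nat) : Int :=
  (List.range k).foldl (fun a i => max a (gcontrib z i p)) 0

theorem getD_set_self (l : List Int) (n : Nat) (a : Int) (h : n < l.length) :
    (l.set n a).getD n 0 = a := by
  simp [List.getD_eq_getElem?_getD, h]

theorem getD_set_ne (l : List Int) {n m : Nat} (a : Int) (h : n ≠ m) :
    (l.set n a).getD m 0 = l.getD m 0 := by
  simp [List.getD_eq_getElem?_getD, List.getElem?_set_ne h]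

theorem Fk_succ (z : List Int) (k p : Nat) :
    Fk z (k + 1) p = max (Fk z k p) (contrib z k p) := by
  unfold Fk; rw [List.range_succ, List.foldl_append]; rfl

theorem Gk_succ (z : List Int) (k p : Nat) :
    Gk z (k + 1) p = max (Gk z k p) (gcontrib z k p) := by
  unfold Gk; rw [List.range_succ, List.foldl_append]; rfl

theorem Fk_nonneg (z : List Int) (k p : Nat) : 0 ≤ Fk z k p := by
  induction k with
  | zero => simp [Fk]
  | succ k ih => rw [Fk_succ]; exact le_trans ih (le_max_left _ _)

theorem Gk_nonneg (z : List Int) (k p : Nat) : 0 ≤ Gk z k p := by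
  induction k with
  | zero => simp [Gk]
  | succ k ih => rw [Gk_succ]; exact le_trans ih (le_max_left _ _)

theorem contrib_le (z : List Int) {i k : Nat} (p : Nat) (h : i < k) :
    contrib z i p ≤ Fk z k p := by
  induction k with
  | zero => omega
  | succ k ih =>
    rw [Fk_succ]
    rcases Nat.lt_succ_iff_lt_or_eq.mp h with h' | h'
    · exact le_trans (ih h') (le_max_left _ _)
    · subst h'; exact le_max_right _ _

theorem gcontrib_le (z : List Int) {i k : Nat} (p : Nat) (h : i < k) :
    gcontrib z i p ≤ Gk z k p := by
  induction k with
  | zero => omega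
  | succ k ih =>
    rw [Gk_succ]
    rcases Nat.lt_succ_iff_lt_or_eq.mp h with h' | h'
    · exact le_trans (ih h') (le_max_left _ _)
    · subst h'; exact le_max_right _ _

theorem Fk_attained (z : List Int) {k p : Nat} (h : 0 < Fk z k p) :
    ∃ i, i < k ∧ contrib z i p = Fk z k p := by
  induction k with
  | zero => simp [Fk] at h
  | succ k ih =>
    rw [Fk_succ] at h ⊢
    rcases le_total (contrib z k p) (Fk z k p) with hle | hle2
    · rw [max_eq_left hle] at h ⊢
      obtain ⟨i, hi, he⟩ := ih h
      exact ⟨i, Nat.lt_succ_of_lt hi, he⟩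
    · rw [max_eq_right hle2]
      exact ⟨k, Nat.lt_succ_self k, rfl⟩

theorem Gk_attained (z : List Int) {k p : Nat} (h : 0 < Gk z k p) :
    ∃ i, i < k ∧ gcontrib z i p = Gk z k p := by
  induction k with
  | zero => simp [Gk] at h
  | succ k ih =>
    rw [Gk_succ] at h ⊢
    rcases le_total (gcontrib z k p) (Gk z k p) with hle | hle2
    · rw [max_eq_left hle] at h ⊢
      obtain ⟨i, hi, he⟩ := ih h
      exact ⟨i, Nat.lt_succ_of_lt hi, he⟩
    · rw [max_eq_right hle2]
      exact ⟨k, Nat.lt_succ_self k, rfl⟩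

theorem contrib_pos (z : List Int) {i p : Nat} (h : 0 < contrib z i p) :
    1 ≤ i ∧ 0 < z.getD i 0 ∧ (i : Int) ≤ (p : Int) ∧ (p : Int) ≤ (i : Int) + z.getD i 0 - 1 ∧
      contrib z i p = (p : Int) - (i : Int) + 1 := by
  unfold contrib at h ⊢; split_ifs with hc
  · exact ⟨hc.1, hc.2.1, hc.2.2.1, hc.2.2.2, rfl⟩
  · omega

theorem gcontrib_pos (z : List Int) {i p : Nat} (h : 0 < gcontrib z i p) :
    1 ≤ i ∧ 0 < z.getD i 0 ∧ (p : Int) = (i : Int) + z.getD i 0 - 1 ∧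
      gcontrib z i p = z.getD i 0 := by
  unfold gcontrib at h ⊢; split_ifs with hc
  · exact ⟨hc.1, hc.2.1, hc.2.2, rfl⟩
  · omega

theorem contrib_of_cond (z : List Int) {i p : Nat}
    (h1 : 1 ≤ i) (h2 : 0 < z.getD i 0) (h3 : (i : Int) ≤ (p : Int))
    (h4 : (p : Int) ≤ (i : Int) + z.getD i 0 - 1) :
    contrib z i p = (p : Int) - (i : Int) + 1 := by
  unfold contrib; rw [if_pos ⟨h1, h2, h3, h4⟩]

theorem contrib_eq_zero_of_gt (z : List Int) {i p : Nat}
    (h : (i : Int) + z.getD i 0 - 1 < (p : Int)) : contrib z i p = 0 := by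
  unfold contrib; split_ifs with hc
  · omega
  · rfl

theorem contrib_eq_zero_of_lt (z : List Int) {i p : Nat} (h : p < i) : contrib z i p = 0 := by
  unfold contrib; split_ifs with hc
  · omega
  · rfl

theorem contrib_le_val (z : List Int) {i p : Nat} (h : (i : Int) ≤ (p : Int)) :
    contrib z i p ≤ (p : Int) - (i : Int) + 1 := by
  unfold contrib; split_ifs with hc
  · omega
  · omega

-- Fk at k+1 equals Fk at k wherever box k does not contribute
theorem Fk_succ_of_zero (z : List Int) {k p : Nat} (h : contrib z k p = 0) :
    Fk z (k + 1) p = Fk z k p := by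
  rw [Fk_succ, h, max_eq_left (Fk_nonneg z k p)]

theorem Fk_succ_of_le (z : List Int) {k p : Nat} (h : contrib z k p ≤ Fk z k p) :
    Fk z (k + 1) p = Fk z k p := by
  rw [Fk_succ, max_eq_left h]

theorem aInner_spec (z : List Int) (k : Nat) (hk1 : 1 ≤ k)
    (hzk : 0 < z.getD k 0) (hbound : (k : Int) + z.getD k 0 ≤ (z.length : Int)) :
    ∀ (j : Nat) (pi : List Int), pi.length = z.length → (j : Int) ≤ z.getD k 0 - 1 →
      (∀ q, q < z.length → pi.getD q 0 = if k + j < q then Fk z (k + 1) q else Fk z k q) →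
      (aInner k j pi).length = z.length ∧
        ∀ q, q < z.length → (aInner k j pi).getD q 0 = Fk z (k + 1) q := by
  intro j
  induction j with
  | zero =>
    intro pi hlen hj hinv
    unfold aInner
    have hkn : k < z.length := by omega
    have hpik : pi.getD (k + 0) 0 = Fk z k k := by
      have := hinv (k + 0) (by omega)
      simpa using this
    by_cases hz : pi.getD (k + 0) 0 = 0
    · rw [if_pos hz]
      have hFkk : Fk z k k = 0 := by rw [← hpik]; simpa using hz
      constructor
      · simp [hlen]
      · intro q hq
        by_cases hqe : q = k
        · rw [hqe]
          rw [show k + 0 = k from rfl, getD_set_self pi k _ (by omega)]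
          have hc : contrib z k k = (k : Int) - (k : Int) + 1 :=
            contrib_of_cond z hk1 hzk (le_refl _) (by omega)
          rw [Fk_succ, hFkk, hc]
          simp
        · rw [show k + 0 = k from rfl, getD_set_ne pi _ (fun h => hqe h.symm)]
          have := hinv q hq
          rcases Nat.lt_or_ge k q with hlt | hge
          · rw [this, if_pos (by omega)]
          · have hqk : q < k := by omega
            rw [this, if_neg (by omega)]
            exact (Fk_succ_of_zero z (contrib_eq_zero_of_lt z hqk)).symm
    · rw [if_neg hz]
      refine ⟨hlen, ?_⟩
      intro q hq
      have hFpos : 0 < Fk z k k := by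
        have h0 := Fk_nonneg z k k
        rw [hpik] at hz; omega
      obtain ⟨i', hi', hci'⟩ := Fk_attained z hFpos
      obtain ⟨h1, h2, h3, h4, _⟩ := contrib_pos z (by omega : 0 < contrib z i' k)
      have := hinv q hq
      rcases Nat.lt_or_ge k q with hlt | hge
      · rw [this, if_pos (by omega)]
      · rw [this, if_neg (by omega)]
        refine (Fk_succ_of_le z ?_).symm
        by_cases hqk : q < k
        · rw [contrib_eq_zero_of_lt z hqk]; exact Fk_nonneg z k q
        · -- k ≤ q ≤ k : q = k; box i' covers q with a strictly larger value
          have hqk' : q = k := by omega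
          have hci'q : contrib z i' q = (q : Int) - (i' : Int) + 1 :=
            contrib_of_cond z h1 h2 (by push_cast; omega) (by push_cast at h4 ⊢; omega)
          have hle := contrib_le z (p := q) hi'
          have := contrib_le_val z (i := k) (p := q) (by push_cast; omega)
          push_cast at hci'q hle this ⊢
          omega
  | succ j' ih =>
    intro pi hlen hj hinv
    unfold aInner
    have hkn : k + (j' + 1) < z.length := by push_cast at hj hbound; omega
    have hpik : pi.getD (k + (j' + 1)) 0 = Fk z k (k + (j' + 1)) := by
      have := hinv (k + (j' + 1)) hkn
      rw [this, if_neg (by omega)]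
    by_cases hz : pi.getD (k + (j' + 1)) 0 = 0
    · rw [if_pos hz]
      have hFkk : Fk z k (k + (j' + 1)) = 0 := by rw [← hpik]; exact hz
      apply ih
      · simp [hlen]
      · push_cast at hj ⊢; omega
      · intro q hq
        by_cases hqe : q = k + (j' + 1)
        · subst hqe
          rw [getD_set_self pi _ _ (by omega), if_pos (by omega)]
          have hc : contrib z k (k + (j' + 1)) = ((k + (j' + 1) : Nat) : Int) - (k : Int) + 1 :=
            contrib_of_cond z hk1 hzk (by push_cast; omega) (by push_cast at hj ⊢; omega)
          rw [Fk_succ, hFkk, hc]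
          push_cast
          omega
        · rw [getD_set_ne pi _ (fun h => hqe h.symm), hinv q hq]
          by_cases hcmp : k + j' < q
          · rw [if_pos hcmp, if_pos (by omega)]
          · rw [if_neg hcmp, if_neg (by omega)]
    · rw [if_neg hz]
      refine ⟨hlen, ?_⟩
      intro q hq
      have hFpos : 0 < Fk z k (k + (j' + 1)) := by
        have h0 := Fk_nonneg z k (k + (j' + 1))
        rw [hpik] at hz; omega
      obtain ⟨i', hi', hci'⟩ := Fk_attained z hFpos
      obtain ⟨h1, h2, h3, h4, _⟩ := contrib_pos z (by omega : 0 < contrib z i' (k + (j' + 1)))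
      have := hinv q hq
      rcases Nat.lt_or_ge (k + (j' + 1)) q with hlt | hge
      · rw [this, if_pos (by omega)]
      · rw [this, if_neg (by omega)]
        refine (Fk_succ_of_le z ?_).symm
        by_cases hqk : q < k
        · rw [contrib_eq_zero_of_lt z hqk]; exact Fk_nonneg z k q
        · have hci'q : contrib z i' q = (q : Int) - (i' : Int) + 1 :=
            contrib_of_cond z h1 h2 (by push_cast; omega) (by push_cast at h4 ⊢; omega)
          have hle := contrib_le z (p := q) hi'
          have := contrib_le_val z (i := k) (p := q) (by push_cast; omega)
          push_cast at hci'q hle this ⊢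
          omega

theorem Gk_succ_of_zero (z : List Int) {k p : Nat} (h : gcontrib z k p = 0) :
    Gk z (k + 1) p = Gk z k p := by
  rw [Gk_succ, h, max_eq_left (Gk_nonneg z k p)]

theorem gcontrib_eq_zero_of_ne (z : List Int) {k q : Nat}
    (h : (q : Int) ≠ (k : Int) + z.getD k 0 - 1) : gcontrib z k q = 0 := by
  unfold gcontrib; split_ifs with hc
  · exact absurd hc.2.2 h
  · rfl

theorem aStep_spec (z : List Int) (hpre : Pre_z_to_prefix_function z) (m : Nat)
    (hm1 : 1 ≤ m) (hmn : m < z.length) (pi : List Int) (hlen : pi.length = z.length)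
    (hptw : ∀ q, q < z.length → pi.getD q 0 = Fk z m q) :
    (aStep z pi (m : Int)).length = z.length ∧
      ∀ q, q < z.length → (aStep z pi (m : Int)).getD q 0 = Fk z (m + 1) q := by
  unfold aStep
  simp only [Int.toNat_natCast]
  by_cases hzi : 0 < z.getD m 0
  · rw [if_pos hzi]
    apply aInner_spec z m hm1 hzi (hpre m hmn hm1 hzi)
    · exact hlen
    · rw [Int.toNat_of_nonneg (by omega)]
    · intro q hq
      rw [hptw q hq]
      by_cases hcmp : m + (z.getD m 0 - 1).toNat < q
      · rw [if_pos hcmp]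
        refine (Fk_succ_of_zero z (contrib_eq_zero_of_gt z ?_)).symm
        have := Int.toNat_of_nonneg (show (0:Int) ≤ z.getD m 0 - 1 by omega)
        push_cast at hcmp ⊢
        omega
      · rw [if_neg hcmp]
  · rw [if_neg hzi]
    refine ⟨hlen, ?_⟩
    intro q hq
    rw [hptw q hq]
    have hc : contrib z m q = 0 := by
      unfold contrib; split_ifs with h
      · exact absurd h.2.1 hzi
      · rfl
    exact (Fk_succ_of_zero z hc).symm

theorem aFold_spec (z : List Int) (hpre : Pre_z_to_prefix_function z) :
    ∀ (m : Nat), 1 ≤ m → m ≤ z.length →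
      ((PySem.List.pyRange 1 (m : Int) 1).foldl (aStep z) (List.replicate z.length (0 : Int))).length = z.length ∧
      ∀ q, q < z.length →
        ((PySem.List.pyRange 1 (m : Int) 1).foldl (aStep z) (List.replicate z.length (0 : Int))).getD q 0 = Fk z m q := by
  intro m
  induction m with
  | zero => omega
  | succ m ih =>
    intro _ hm1
    by_cases hm : m = 0
    · subst hm
      rw [show (((0 + 1 : Nat) : Int)) = 1 by norm_num, PySem.List.pyRange_one_eq_nil (by norm_num),
        List.foldl_nil]
      refine ⟨by simp, ?_⟩
      intro q hq
      have hc0 : contrib z 0 q = 0 := by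
        unfold contrib; split_ifs with h
        · omega
        · rfl
      rw [show (0 + 1 : Nat) = 0 + 1 from rfl, Fk_succ, hc0]
      simp [Fk, List.getD_eq_getElem?_getD, hq]
    · have hm1' : 1 ≤ m := by omega
      obtain ⟨ihlen, ihptw⟩ := ih hm1' (by omega)
      have hsplit : PySem.List.pyRange 1 ((m + 1 : Nat) : Int) 1
          = PySem.List.pyRange 1 (m : Int) 1 ++ [(m : Int)] := by
        push_cast
        exact PySem.List.pyRange_one_succ_right (by exact_mod_cast hm1')
      rw [hsplit, List.foldl_append, List.foldl_cons, List.foldl_nil]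
      exact aStep_spec z hpre m hm1' (by omega) _ ihlen ihptw

theorem bStep_spec (z : List Int) (hpre : Pre_z_to_prefix_function z) (m : Nat)
    (hm1 : 1 ≤ m) (hmn : m < z.length) (pi : List Int) (hlen : pi.length = z.length)
    (hptw : ∀ q, q < z.length → pi.getD q 0 = Gk z m q) :
    (bStep z pi (m : Int)).length = z.length ∧
      ∀ q, q < z.length → (bStep z pi (m : Int)).getD q 0 = Gk z (m + 1) q := by
  unfold bStep
  simp only [Int.toNat_natCast]
  by_cases hzi : 0 < z.getD m 0
  · rw [if_pos hzi]
    have htn : (((z.getD m 0 - 1).toNat : Int)) = z.getD m 0 - 1 :=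
      Int.toNat_of_nonneg (by omega)
    have hen : m + (z.getD m 0 - 1).toNat < z.length := by
      have := hpre m hmn hm1 hzi
      push_cast at this ⊢
      omega
    have hlen2 : (if pi.getD (m + (z.getD m 0 - 1).toNat) 0 < z.getD m 0
        then pi.set (m + (z.getD m 0 - 1).toNat) (z.getD m 0) else pi).length = z.length := by
      split_ifs <;> simp [hlen]
    refine ⟨hlen2, ?_⟩
    intro q hq
    by_cases hqe : q = m + (z.getD m 0 - 1).toNat
    · have hge : gcontrib z m q = z.getD m 0 := by
        unfold gcontrib
        rw [if_pos ⟨hm1, hzi, by rw [hqe]; push_cast [htn]; omega⟩]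
      rw [Gk_succ, hge]
      have hpq := hptw q hq
      split_ifs with hlt
      · rw [hqe, getD_set_self _ _ _ (by omega), ← hqe]
        rw [← hqe, hpq] at hlt
        rw [max_eq_right (le_of_lt hlt)]
      · rw [← hqe, hpq] at hlt
        rw [hpq]
        rw [max_eq_left (by omega)]
    · have hgz : gcontrib z m q = 0 := by
        apply gcontrib_eq_zero_of_ne
        have := htn
        push_cast at this ⊢
        omega
      have hunch : (if pi.getD (m + (z.getD m 0 - 1).toNat) 0 < z.getD m 0
          then pi.set (m + (z.getD m 0 - 1).toNat) (z.getD m 0) else pi).getD q 0 = pi.getD q 0 := by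
        split_ifs
        · exact getD_set_ne pi _ (fun h => hqe h.symm)
        · rfl
      rw [hunch, hptw q hq, Gk_succ_of_zero z hgz]
  · rw [if_neg hzi]
    refine ⟨hlen, ?_⟩
    intro q hq
    have hgz : gcontrib z m q = 0 := by
      unfold gcontrib; split_ifs with h
      · exact absurd h.2.1 hzi
      · rfl
    rw [hptw q hq, Gk_succ_of_zero z hgz]

theorem bFold_spec (z : List Int) (hpre : Pre_z_to_prefix_function z) :
    ∀ (m : Nat), 1 ≤ m → m ≤ z.length →
      ((PySem.List.pyRange 1 (m : Int) 1).foldl (bStep z) (List.replicate z.length (0 : Int))).length = z.length ∧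
      ∀ q, q < z.length →
        ((PySem.List.pyRange 1 (m : Int) 1).foldl (bStep z) (List.replicate z.length (0 : Int))).getD q 0 = Gk z m q := by
  intro m
  induction m with
  | zero => omega
  | succ m ih =>
    intro _ hm1
    by_cases hm : m = 0
    · subst hm
      rw [show (((0 + 1 : Nat) : Int)) = 1 by norm_num, PySem.List.pyRange_one_eq_nil (by norm_num),
        List.foldl_nil]
      refine ⟨by simp, ?_⟩
      intro q hq
      have hc0 : gcontrib z 0 q = 0 := by
        unfold gcontrib; split_ifs with h
        · omega
        · rfl
      rw [show (0 + 1 : Nat) = 0 + 1 from rfl, Gk_succ, hc0]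
      simp [Gk, List.getD_eq_getElem?_getD, hq]
    · have hm1' : 1 ≤ m := by omega
      obtain ⟨ihlen, ihptw⟩ := ih hm1' (by omega)
      have hsplit : PySem.List.pyRange 1 ((m + 1 : Nat) : Int) 1
          = PySem.List.pyRange 1 (m : Int) 1 ++ [(m : Int)] := by
        push_cast
        exact PySem.List.pyRange_one_succ_right (by exact_mod_cast hm1')
      rw [hsplit, List.foldl_append, List.foldl_cons, List.foldl_nil]
      exact bStep_spec z hpre m hm1' (by omega) _ ihlen ihptw

theorem Fk_top (z : List Int) (hpre : Pre_z_to_prefix_function z) {p : Nat}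
    (hp : z.length ≤ p) : ∀ k, k ≤ z.length → Fk z k p = 0 := by
  intro k
  induction k with
  | zero => intro _; simp [Fk]
  | succ k ih =>
    intro hk
    have hc : contrib z k p = 0 := by
      unfold contrib; split_ifs with h
      · have := hpre k (by omega) h.1 h.2.1
        omega
      · rfl
    rw [Fk_succ, ih (by omega), hc]
    simp

theorem F_rec (z : List Int) (hpre : Pre_z_to_prefix_function z) (p : Nat) :
    Fk z z.length p = max (Gk z z.length p) (Fk z z.length (p + 1) - 1) := by
  apply le_antisymm
  · by_cases hF : 0 < Fk z z.length p
    · obtain ⟨i, hi, hci⟩ := Fk_attained z hF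
      obtain ⟨h1, h2, h3, h4, hval⟩ := contrib_pos z (i := i) (p := p) (by omega)
      by_cases hend : (p : Int) = (i : Int) + z.getD i 0 - 1
      · have hg : gcontrib z i p = z.getD i 0 := by
          unfold gcontrib; rw [if_pos ⟨h1, h2, hend⟩]
        have := gcontrib_le z (p := p) hi
        refine le_trans ?_ (le_max_left _ _)
        omega
      · have hc1 : contrib z i (p + 1) = ((p + 1 : Nat) : Int) - (i : Int) + 1 :=
          contrib_of_cond z h1 h2 (by push_cast; omega) (by push_cast; omega)
        have := contrib_le z (p := p + 1) hi
        refine le_trans ?_ (le_max_right _ _)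
        push_cast at hc1 ⊢
        omega
    · have := Gk_nonneg z z.length p
      refine le_trans ?_ (le_max_left _ _)
      omega
  · apply max_le
    · by_cases hG : 0 < Gk z z.length p
      · obtain ⟨i, hi, hgi⟩ := Gk_attained z hG
        obtain ⟨h1, h2, h3, hval⟩ := gcontrib_pos z (i := i) (p := p) (by omega)
        have hc : contrib z i p = (p : Int) - (i : Int) + 1 :=
          contrib_of_cond z h1 h2 (by omega) (by omega)
        have := contrib_le z (p := p) hi
        omega
      · have := Fk_nonneg z z.length p
        omega
    · by_cases hF : 0 < Fk z z.length (p + 1)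
      · obtain ⟨i, hi, hci⟩ := Fk_attained z hF
        obtain ⟨h1, h2, h3, h4, hval⟩ := contrib_pos z (i := i) (p := p + 1) (by omega)
        by_cases hip : (i : Int) ≤ (p : Int)
        · have hc : contrib z i p = (p : Int) - (i : Int) + 1 :=
            contrib_of_cond z h1 h2 hip (by push_cast at h4 ⊢; omega)
          have := contrib_le z (p := p) hi
          push_cast at hval ⊢
          omega
        · have := Fk_nonneg z z.length p
          push_cast at hval h3 ⊢
          omega
      · have h1 := Fk_nonneg z z.length p
        have h2 := Fk_nonneg z z.length (p + 1)
        omega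

theorem bSweep_spec (z : List Int) (hpre : Pre_z_to_prefix_function z) :
    ∀ (p : Nat) (pi : List Int), p < z.length → pi.length = z.length →
      (∀ q, q < z.length → pi.getD q 0 = if p ≤ q then Fk z z.length q else Gk z z.length q) →
      (bSweep p pi).length = z.length ∧
        ∀ q, q < z.length → (bSweep p pi).getD q 0 = Fk z z.length q := by
  intro p
  induction p with
  | zero =>
    intro pi hp hlen hinv
    unfold bSweep
    refine ⟨hlen, ?_⟩
    intro q hq
    rw [hinv q hq, if_pos (Nat.zero_le q)]
  | succ p' ih =>
    intro pi hp hlen hinv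
    unfold bSweep
    have hp1 : pi.getD (p' + 1) 0 = Fk z z.length (p' + 1) := by
      rw [hinv _ hp, if_pos (le_refl _)]
    have hp0 : pi.getD p' 0 = Gk z z.length p' := by
      rw [hinv p' (by omega), if_neg (by omega)]
    have hrec := F_rec z hpre p'
    apply ih
    · omega
    · split_ifs <;> simp [hlen]
    · intro q hq
      by_cases hqe : q = p'
      · rw [hqe, if_pos (le_refl _)]
        split_ifs with hlt
        · rw [getD_set_self _ _ _ (by omega), hrec]
          rw [hp0, hp1] at hlt
          rw [max_eq_right (by omega), hp1]
        · rw [hrec]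
          rw [hp0, hp1] at hlt
          rcases le_total (Gk z z.length p') (Fk z z.length (p' + 1) - 1) with hle | hle
          · rw [max_eq_right hle]
            omega
          · rw [max_eq_left hle]
            exact hp0
      · have hunch : (if pi.getD p' 0 < pi.getD (p' + 1) 0 - 1
            then pi.set p' (pi.getD (p' + 1) 0 - 1) else pi).getD q 0 = pi.getD q 0 := by
          split_ifs
          · exact getD_set_ne pi _ (fun h => hqe h.symm)
          · rfl
        rw [hunch, hinv q hq]
        by_cases hpq : p' + 1 ≤ q
        · rw [if_pos hpq, if_pos (by omega)]
        · rw [if_neg hpq, if_neg (by omega)]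

theorem list_eq_of_getD {l1 l2 : List Int} (hlen : l1.length = l2.length)
    (h : ∀ q, q < l1.length → l1.getD q 0 = l2.getD q 0) : l1 = l2 := by
  apply List.ext_getElem hlen
  intro q h1 h2
  have := h q h1
  rwa [List.getD_eq_getElem l1 0 h1, List.getD_eq_getElem l2 0 h2] at this

-- ===== VERDICT (by name: the statement is the Claim_ definition above) =====
theorem z_to_prefix_function_spec : Claim_equal_z_to_prefix_function := by
  intro z _ hpre
  unfold Spec_z_to_prefix_function
  by_cases hn : z.length = 0
  · have hz : z = [] := List.eq_nil_of_length_eq_zero hn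
    subst hz
    rfl
  · have hn1 : 1 ≤ z.length := by omega
    obtain ⟨halen, haptw⟩ := aFold_spec z hpre z.length hn1 (le_refl _)
    obtain ⟨hblen, hbptw⟩ := bFold_spec z hpre z.length hn1 (le_refl _)
    have hFG : Fk z z.length (z.length - 1) = Gk z z.length (z.length - 1) := by
      have hrec := F_rec z hpre (z.length - 1)
      have htop : Fk z z.length (z.length - 1 + 1) = 0 :=
        Fk_top z hpre (by omega) z.length (le_refl _)
      rw [htop] at hrec
      rw [hrec, max_eq_left (by have := Gk_nonneg z z.length (z.length - 1); omega)]
    have hinv0 : ∀ q, q < z.length →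
        ((PySem.List.pyRange 1 (z.length : Int) 1).foldl (bStep z)
          (List.replicate z.length (0 : Int))).getD q 0 =
        if z.length - 1 ≤ q then Fk z z.length q else Gk z z.length q := by
      intro q hq
      rw [hbptw q hq]
      by_cases hql : z.length - 1 ≤ q
      · have hqeq : q = z.length - 1 := by omega
        rw [if_pos hql, hqeq, hFG]
      · rw [if_neg hql]
    obtain ⟨hslen, hsptw⟩ := bSweep_spec z hpre (z.length - 1) _ (by omega) hblen hinv0
    unfold z_to_prefix_function z_to_prefix_function_alt
    apply list_eq_of_getD
    · rw [halen, hslen]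
    · intro q hq
      rw [halen] at hq
      rw [haptw q hq, hsptw q hq]
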